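-- pv_equiv track=rewrite | github.com/santhoshpemmaka/DSA-100days | Hashing/commonsubarraySamesumarrays.py | commonsumof_arrays
-- ===== SOURCE A (Python) =====
-- def commonsumof_arrays(arr,arr1):
--     longest_subarray = 0
--     for i in range(len(arr)):
--         sum1 = 0
--         sum2 = 0
--         for j in range(i,len(arr)):
--             sum1 +=arr[j]
--             sum2 +=arr1[j]
--             if sum1 == sum2:
--                 longest_subarray = max(longest_subarray,j-i+1)
--     return longest_subarray
-- ===== SOURCE B (Python) =====
-- def commonsumof_arrays(arr, arr1):
--     # prefix sum of element-wise differences + first-index hashmap: O(n)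
--     best = 0
--     first = {0: -1}
--     d = 0
--     for j in range(len(arr)):
--         d += arr[j] - arr1[j]
--         if d in first:
--             best = max(best, j - first[d])
--         else:
--             first[d] = j
--     return best
-- ===== Notes on version B (the rewrite author's own statement) =====
-- stated objective: faster
-- what changed: Replaced the O(n^2) double loop over all start/end pairs by a single pass computing the prefix sum of element-wise differences with a hashmap storing the first index of each prefix value.
import Mathlib
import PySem

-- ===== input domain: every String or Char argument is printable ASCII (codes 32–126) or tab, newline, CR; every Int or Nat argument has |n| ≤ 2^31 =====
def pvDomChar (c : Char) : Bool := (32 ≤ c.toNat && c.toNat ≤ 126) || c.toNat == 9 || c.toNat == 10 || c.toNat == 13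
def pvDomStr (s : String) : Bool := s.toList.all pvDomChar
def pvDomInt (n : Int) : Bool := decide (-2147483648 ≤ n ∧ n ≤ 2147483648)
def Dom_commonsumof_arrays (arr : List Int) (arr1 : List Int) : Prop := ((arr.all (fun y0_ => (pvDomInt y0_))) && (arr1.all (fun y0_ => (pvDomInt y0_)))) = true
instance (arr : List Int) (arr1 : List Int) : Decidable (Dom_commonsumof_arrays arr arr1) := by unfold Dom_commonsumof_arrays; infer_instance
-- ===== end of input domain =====

-- B replaces A's quadratic double scan by a single pass over the prefix sums of the
-- element-wise differences with a first-index hashmap (measurably faster, asymptotic change).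


-- ===== PORT A =====
def commonsumof_arrays (arr : List Int) (arr1 : List Int) : Int :=
  (PySem.List.pyRange 0 arr.length 1).foldl (fun longest i =>
    ((PySem.List.pyRange i arr.length 1).foldl
      (fun (st : Int × Int × Int) j =>
        let s1 := st.1 + PySem.List.pyGetD arr j 0
        let s2 := st.2.1 + PySem.List.pyGetD arr1 j 0
        (s1, s2, if s1 == s2 then max st.2.2 (j - i + 1) else st.2.2))
      (0, 0, longest)).2.2) 0

-- ===== PORT B =====
def commonsumof_arrays_alt (arr : List Int) (arr1 : List Int) : Int :=
  ((PySem.List.pyRange 0 arr.length 1).foldl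
    (fun (st : Int × PySem.Dict Int Int × Int) j =>
      let d := st.2.2 + PySem.List.pyGetD arr j 0 - PySem.List.pyGetD arr1 j 0
      match st.2.1.get? d with
      | some t => (max st.1 (j - t), st.2.1, d)
      | none => (st.1, st.2.1.insert d j, d))
    (0, PySem.Dict.empty.insert 0 (-1), 0)).1

-- ===== PRECONDITION & SPEC =====
-- Pre_ excludes exactly the inputs where the Python A raises IndexError: arr1 shorter than arr.
def Pre_commonsumof_arrays (arr : List Int) (arr1 : List Int) : Prop := arr.length ≤ arr1.length
instance (arr : List Int) (arr1 : List Int) : Decidable (Pre_commonsumof_arrays arr arr1) := by unfold Pre_commonsumof_arrays; infer_instance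
def pvWitness_commonsumof_arrays : List Int × List Int := ([1, 2, 0], [2, 1, 5])

def Spec_commonsumof_arrays (arr : List Int) (arr1 : List Int) (out : Int) : Prop := out = commonsumof_arrays_alt arr arr1
instance (arr : List Int) (arr1 : List Int) (out : Int) : Decidable (Spec_commonsumof_arrays arr arr1 out) := by unfold Spec_commonsumof_arrays; infer_instance

-- ===== CLAIM (what is proved, stated in full; the proofs are below) =====
def Claim_equal_commonsumof_arrays : Prop := ∀ (arr : List Int) (arr1 : List Int), Dom_commonsumof_arrays arr arr1 → Pre_commonsumof_arrays arr arr1 → Spec_commonsumof_arrays arr arr1 (commonsumof_arrays arr arr1)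

-- ===== LEMMAS AND PROOFS =====

-- per-index difference and its prefix sums
def pvF (arr arr1 : List Int) (k : Nat) : Int := arr.getD k 0 - arr1.getD k 0
def pvP (arr arr1 : List Int) (k : Nat) : Int := ((List.range k).map (pvF arr arr1)).sum

-- "(a, b) is an index-aligned window [a, b) with equal sums"
def pvGood (arr arr1 : List Int) (a b : Nat) : Prop :=
  a < b ∧ b ≤ arr.length ∧ pvP arr arr1 a = pvP arr arr1 b

-- "x is the maximal window length (0 if none)"
def pvIsMax (arr arr1 : List Int) (x : Int) : Prop :=
  0 ≤ x ∧ (x = 0 ∨ ∃ a b, pvGood arr arr1 a b ∧ x = (b : Int) - a) ∧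
    ∀ a b, pvGood arr arr1 a b → (b : Int) - a ≤ x

theorem pvIsMax_unique (arr arr1 : List Int) (x y : Int)
    (hx : pvIsMax arr arr1 x) (hy : pvIsMax arr arr1 y) : x = y := by
  obtain ⟨hx0, hxe, hxd⟩ := hx
  obtain ⟨hy0, hye, hyd⟩ := hy
  have h1 : x ≤ y := by
    rcases hxe with h | ⟨a, b, hg, rfl⟩
    · omega
    · exact hyd a b hg
  have h2 : y ≤ x := by
    rcases hye with h | ⟨a, b, hg, rfl⟩
    · omega
    · exact hxd a b hg
  omega

theorem pv_sum_map_sub (l : List Nat) (g h : Nat → Int) :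
    (l.map (fun k => g k - h k)).sum = (l.map g).sum - (l.map h).sum := by
  induction l with
  | nil => simp
  | cons x xs ih => simp [ih]; ring

theorem pvP_window (arr arr1 : List Int) (i m : Nat) :
    pvP arr arr1 (i + m) =
      pvP arr arr1 i + ((List.range m).map (fun k => pvF arr arr1 (i + k))).sum := by
  simp [pvP, List.range_add, Function.comp_def]

theorem pvP_succ (arr arr1 : List Int) (k : Nat) :
    pvP arr arr1 (k + 1) = pvP arr arr1 k + pvF arr arr1 k := by
  simp [pvP, List.range_succ]

-- ---- A reduced to Nat-indexed folds ----
def pvAstep (arr arr1 : List Int) (i : Nat) (st : Int × Int × Int) (k : Nat) : Int × Int × Int :=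
  let s1 := st.1 + arr.getD (i + k) 0
  let s2 := st.2.1 + arr1.getD (i + k) 0
  (s1, s2, if s1 == s2 then max st.2.2 ((k : Int) + 1) else st.2.2)

theorem pvA_natform (arr arr1 : List Int) :
    commonsumof_arrays arr arr1 =
      (List.range arr.length).foldl
        (fun longest i =>
          ((List.range (arr.length - i)).foldl (pvAstep arr arr1 i) (0, 0, longest)).2.2) 0 := by
  unfold commonsumof_arrays
  rw [PySem.List.pyRange_one]
  have h0 : ((arr.length : Int) - 0).toNat = arr.length := by omega
  rw [h0, List.foldl_map]
  apply List.foldl_ext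
  intro longest i _
  rw [PySem.List.pyRange_one]
  have h1 : ((arr.length : Int) - (0 + (i : Int))).toNat = arr.length - i := by omega
  rw [h1, List.foldl_map]
  refine congrArg (fun p : Int × Int × Int => p.2.2) ?_
  apply List.foldl_ext
  intro st k _
  have h2 : (0 : Int) + (i : Int) + (k : Int) = ((i + k : Nat) : Int) := by push_cast; ring
  simp only [h2, PySem.List.pyGetD_natCast, pvAstep]
  have h3 : ((i + k : Nat) : Int) - (0 + (i : Int)) + 1 = (k : Int) + 1 := by push_cast; ring
  rw [h3]

-- ---- A's inner loop: running sums are window sums; third component is the running max ----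
theorem pvA_inner (arr arr1 : List Int) (i : Nat) (m : Nat) (L0 : Int) :
    ∃ L, (List.range m).foldl (pvAstep arr arr1 i) (0, 0, L0)
        = (((List.range m).map (fun k => arr.getD (i + k) 0)).sum,
           ((List.range m).map (fun k => arr1.getD (i + k) 0)).sum, L)
      ∧ L0 ≤ L
      ∧ (L = L0 ∨ ∃ k, k < m ∧ pvP arr arr1 (i + k + 1) = pvP arr arr1 i ∧ L = (k : Int) + 1)
      ∧ ∀ k, k < m → pvP arr arr1 (i + k + 1) = pvP arr arr1 i → (k : Int) + 1 ≤ L := by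
  induction m with
  | zero => exact ⟨L0, by simp, le_refl _, Or.inl rfl, by omega⟩
  | succ m ih =>
    obtain ⟨L, hfold, hle, hex, hdom⟩ := ih
    have hstep : (List.range (m + 1)).foldl (pvAstep arr arr1 i) (0, 0, L0)
        = pvAstep arr arr1 i ((List.range m).foldl (pvAstep arr arr1 i) (0, 0, L0)) m := by
      rw [List.range_succ, List.foldl_append]; rfl
    rw [hstep, hfold]
    set S1 := ((List.range m).map (fun k => arr.getD (i + k) 0)).sum with hS1
    set S2 := ((List.range m).map (fun k => arr1.getD (i + k) 0)).sum with hS2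
    have hsum1 : ((List.range (m + 1)).map (fun k => arr.getD (i + k) 0)).sum
        = S1 + arr.getD (i + m) 0 := by rw [List.range_succ]; simp [hS1]
    have hsum2 : ((List.range (m + 1)).map (fun k => arr1.getD (i + k) 0)).sum
        = S2 + arr1.getD (i + m) 0 := by rw [List.range_succ]; simp [hS2]
    have hkey : (S1 + arr.getD (i + m) 0) - (S2 + arr1.getD (i + m) 0)
        = pvP arr arr1 (i + (m + 1)) - pvP arr arr1 i := by
      rw [pvP_window arr arr1 i (m + 1)]
      have hsub : ((List.range (m + 1)).map (fun k => pvF arr arr1 (i + k))).sum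
          = ((List.range (m + 1)).map (fun k => arr.getD (i + k) 0)).sum
            - ((List.range (m + 1)).map (fun k => arr1.getD (i + k) 0)).sum := by
        rw [← pv_sum_map_sub]; rfl
      rw [hsub, hsum1, hsum2]; ring
    simp only [pvAstep]
    by_cases hc : S1 + arr.getD (i + m) 0 = S2 + arr1.getD (i + m) 0
    · have hP : pvP arr arr1 (i + m + 1) = pvP arr arr1 i := by
        have hh : i + m + 1 = i + (m + 1) := by omega
        rw [hh]; omega
      simp only [hc, beq_self_eq_true, if_true]
      refine ⟨max L ((m : Int) + 1), by rw [hsum1, hsum2, hc], le_trans hle (le_max_left _ _), ?_, ?_⟩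
      · rcases max_cases L ((m : Int) + 1) with ⟨hmx, hba⟩ | ⟨hmx, hba⟩
        · rcases hex with h | ⟨k, hk, hPk, hL⟩
          · exact Or.inl (by omega)
          · exact Or.inr ⟨k, by omega, hPk, by omega⟩
        · exact Or.inr ⟨m, by omega, hP, hmx⟩
      · intro k hk hPk
        rcases Nat.lt_succ_iff_lt_or_eq.mp hk with h | rfl
        · exact le_trans (hdom k h hPk) (le_max_left _ _)
        · exact le_max_right _ _
    · have hne : (S1 + arr.getD (i + m) 0 == S2 + arr1.getD (i + m) 0) = false :=
        beq_eq_false_iff_ne.mpr hc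
      simp only [hne, Bool.false_eq_true, if_false]
      refine ⟨L, by rw [hsum1, hsum2], hle, ?_, ?_⟩
      · rcases hex with h | ⟨k, hk, hPk, hL⟩
        · exact Or.inl h
        · exact Or.inr ⟨k, by omega, hPk, hL⟩
      · intro k hk hPk
        rcases Nat.lt_succ_iff_lt_or_eq.mp hk with h | rfl
        · exact hdom k h hPk
        · exfalso
          apply hc
          have hh : i + k + 1 = i + (k + 1) := by omega
          rw [hh] at hPk
          omega

theorem pvA_outer (arr arr1 : List Int) (j : Nat) (hj : j ≤ arr.length) (L0 : Int) :
    ∃ R, (List.range j).foldl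
        (fun longest i =>
          ((List.range (arr.length - i)).foldl (pvAstep arr arr1 i) (0, 0, longest)).2.2) L0 = R
      ∧ L0 ≤ R
      ∧ (R = L0 ∨ ∃ a b, pvGood arr arr1 a b ∧ R = (b : Int) - a)
      ∧ ∀ a b, pvGood arr arr1 a b → a < j → (b : Int) - a ≤ R := by
  induction j generalizing L0 with
  | zero => exact ⟨L0, by simp, le_refl _, Or.inl rfl, by omega⟩
  | succ j ih =>
    obtain ⟨R, hfold, hle, hex, hdom⟩ := ih (by omega) L0
    obtain ⟨L, hifold, hile, hiex, hidom⟩ := pvA_inner arr arr1 j (arr.length - j) R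
    rw [List.range_succ, List.foldl_append, hfold]
    simp only [List.foldl_cons, List.foldl_nil]
    rw [hifold]
    refine ⟨L, rfl, le_trans hle hile, ?_, ?_⟩
    · rcases hiex with rfl | ⟨k, hk, hPk, hL⟩
      · exact hex
      · right
        refine ⟨j, j + k + 1, ⟨by omega, by omega, hPk.symm⟩, by push_cast; omega⟩
    · intro a b hg hab
      rcases Nat.lt_succ_iff_lt_or_eq.mp hab with h | rfl
      · exact le_trans (hdom a b hg h) hile
      · obtain ⟨h1, h2, h3⟩ := hg
        have hk : b - a - 1 < arr.length - a := by omega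
        have hP : pvP arr arr1 (a + (b - a - 1) + 1) = pvP arr arr1 a := by
          have hh : a + (b - a - 1) + 1 = b := by omega
          rw [hh]; exact h3.symm
        have hd := hidom (b - a - 1) hk hP
        omega

theorem pvA_isMax (arr arr1 : List Int) : pvIsMax arr arr1 (commonsumof_arrays arr arr1) := by
  rw [pvA_natform]
  obtain ⟨R, hfold, hle, hex, hdom⟩ := pvA_outer arr arr1 arr.length (le_refl _) 0
  rw [hfold]
  refine ⟨hle, hex, ?_⟩
  intro a b hg
  exact hdom a b hg (by obtain ⟨h1, h2, _⟩ := hg; omega)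

-- ---- B reduced to a Nat-indexed fold ----
def pvBstep (arr arr1 : List Int) (st : Int × PySem.Dict Int Int × Int) (j : Nat) :
    Int × PySem.Dict Int Int × Int :=
  let d := st.2.2 + arr.getD j 0 - arr1.getD j 0
  match st.2.1.get? d with
  | some t => (max st.1 ((j : Int) - t), st.2.1, d)
  | none => (st.1, st.2.1.insert d (j : Int), d)

theorem pvB_natform (arr arr1 : List Int) :
    commonsumof_arrays_alt arr arr1 =
      ((List.range arr.length).foldl (pvBstep arr arr1)
        (0, PySem.Dict.empty.insert 0 (-1), 0)).1 := by
  unfold commonsumof_arrays_alt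
  rw [PySem.List.pyRange_one]
  have h0 : ((arr.length : Int) - 0).toNat = arr.length := by omega
  rw [h0, List.foldl_map]
  congr 2
  funext st j
  have h2 : (0 : Int) + (j : Int) = ((j : Nat) : Int) := by ring
  simp only [h2, PySem.List.pyGetD_natCast, pvBstep]

-- ---- B's loop invariant: the dict maps each seen prefix value to (its first index) - 1 ----
def pvDictInv (arr arr1 : List Int) (j : Nat) (D : PySem.Dict Int Int) : Prop :=
  ∀ v : Int,
    ((∃ a, a ≤ j ∧ pvP arr arr1 a = v) → (D.get? v).isSome) ∧
    ∀ t, D.get? v = some t → ∃ a, a ≤ j ∧ pvP arr arr1 a = v ∧ t = (a : Int) - 1 ∧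
      ∀ a', a' ≤ j → pvP arr arr1 a' = v → a ≤ a'

def pvBestInv (arr arr1 : List Int) (j : Nat) (B : Int) : Prop :=
  0 ≤ B ∧
  (B = 0 ∨ ∃ a b, a < b ∧ b ≤ j ∧ pvP arr arr1 a = pvP arr arr1 b ∧ B = (b : Int) - a) ∧
  ∀ a b, a < b → b ≤ j → pvP arr arr1 a = pvP arr arr1 b → (b : Int) - a ≤ B

theorem pvB_inv (arr arr1 : List Int) (j : Nat) :
    ∃ B D, (List.range j).foldl (pvBstep arr arr1) (0, PySem.Dict.empty.insert 0 (-1), 0)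
        = (B, D, pvP arr arr1 j)
      ∧ pvDictInv arr arr1 j D ∧ pvBestInv arr arr1 j B := by
  induction j with
  | zero =>
    refine ⟨0, PySem.Dict.empty.insert 0 (-1), by simp [pvP], ?_, ?_⟩
    · intro v
      constructor
      · rintro ⟨a, ha, hPa⟩
        have ha0 : a = 0 := by omega
        subst ha0
        have hv : v = 0 := by rw [← hPa]; simp [pvP]
        subst hv
        simp [PySem.Dict.get?_insert_self]
      · intro t ht
        rw [PySem.Dict.get?_insert] at ht
        split_ifs at ht with hv
        · subst hv
          have ht' : t = -1 := (Option.some_inj.mp ht).symm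
          exact ⟨0, le_refl _, by simp [pvP], by omega, fun a' _ _ => Nat.zero_le a'⟩
        · simp [PySem.Dict.get?_empty] at ht
    · exact ⟨le_refl _, Or.inl rfl, by omega⟩
  | succ j ih =>
    obtain ⟨B, D, hfold, hdict, hbest⟩ := ih
    obtain ⟨hB0, hBex, hBdom⟩ := hbest
    rw [List.range_succ, List.foldl_append, hfold]
    simp only [List.foldl_cons, List.foldl_nil]
    have hd : pvP arr arr1 j + arr.getD j 0 - arr1.getD j 0 = pvP arr arr1 (j + 1) := by
      rw [pvP_succ]; unfold pvF; ring
    rcases hq : D.get? (pvP arr arr1 (j + 1)) with _ | t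
    · -- value unseen: insert, best unchanged
      have hnone : ¬ ∃ a, a ≤ j ∧ pvP arr arr1 a = pvP arr arr1 (j + 1) := by
        intro hex2
        have hs := (hdict (pvP arr arr1 (j + 1))).1 hex2
        rw [hq] at hs
        simp at hs
      refine ⟨B, D.insert (pvP arr arr1 (j + 1)) (j : Int), ?_, ?_, ?_, ?_, ?_⟩
      · simp only [pvBstep, hd, hq]
      · intro v
        constructor
        · rintro ⟨a, ha, hPa⟩
          rw [PySem.Dict.get?_insert]
          split_ifs with hv
          · simp
          · refine (hdict v).1 ⟨a, ?_, hPa⟩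
            rcases Nat.lt_succ_iff_lt_or_eq.mp (Nat.lt_succ_of_le ha) with h2 | h2
            · omega
            · exfalso; apply hv; rw [← hPa, h2]
        · intro t ht
          rw [PySem.Dict.get?_insert] at ht
          split_ifs at ht with hv
          · subst hv
            have htj : t = ((j : Nat) + 1 : Int) - 1 := by
              have := Option.some_inj.mp ht; omega
            refine ⟨j + 1, le_refl _, rfl, by push_cast at htj ⊢; omega, ?_⟩
            intro a' ha' hPa'
            by_contra hlt
            exact hnone ⟨a', by omega, hPa'⟩
          · obtain ⟨a, ha, hPa, hta, hmin⟩ := (hdict v).2 t ht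
            refine ⟨a, by omega, hPa, hta, ?_⟩
            intro a' ha' hPa'
            rcases Nat.lt_succ_iff_lt_or_eq.mp (Nat.lt_succ_of_le ha') with h | h
            · exact hmin a' (by omega) hPa'
            · exfalso; apply hv; rw [← hPa', h]
      · exact hB0
      · rcases hBex with h | ⟨a, b, h1, h2, h3, h4⟩
        · exact Or.inl h
        · exact Or.inr ⟨a, b, h1, by omega, h3, h4⟩
      · intro a b hab hbj hP
        rcases Nat.lt_succ_iff_lt_or_eq.mp (Nat.lt_succ_of_le hbj) with h | h
        · exact hBdom a b hab (by omega) hP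
        · exfalso
          exact hnone ⟨a, by omega, by rw [hP, h]⟩
    · -- value seen before at minimal index a: best updated, dict unchanged
      obtain ⟨a, ha, hPa, hta, hmin⟩ := (hdict (pvP arr arr1 (j + 1))).2 t hq
      refine ⟨max B ((j : Int) - t), D, ?_, ?_, ?_, ?_, ?_⟩
      · simp only [pvBstep, hd, hq]
      · intro v
        constructor
        · rintro ⟨a', ha', hPa'⟩
          rcases Nat.lt_succ_iff_lt_or_eq.mp (Nat.lt_succ_of_le ha') with h | h
          · exact (hdict v).1 ⟨a', by omega, hPa'⟩
          · subst h
            rw [← hPa', hq]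
            rfl
        · intro t' ht'
          obtain ⟨a', ha', hPa', hta', hmin'⟩ := (hdict v).2 t' ht'
          refine ⟨a', by omega, hPa', hta', ?_⟩
          intro a'' ha'' hPa''
          rcases Nat.lt_succ_iff_lt_or_eq.mp (Nat.lt_succ_of_le ha'') with h | h
          · exact hmin' a'' (by omega) hPa''
          · subst h
            have hveq : v = pvP arr arr1 (j + 1) := hPa''.symm
            subst hveq
            have htt : t' = t := by rw [ht'] at hq; exact (Option.some_inj.mp hq)
            subst htt
            omega
      · exact le_trans hB0 (le_max_left _ _)
      · right
        rcases max_cases B ((j : Int) - t) with ⟨hmx, _⟩ | ⟨hmx, _⟩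
        · rcases hBex with h | ⟨a', b', h1, h2, h3, h4⟩
          · exact ⟨a, j + 1, by omega, le_refl _, hPa, by push_cast; omega⟩
          · exact ⟨a', b', h1, by omega, h3, by omega⟩
        · exact ⟨a, j + 1, by omega, le_refl _, hPa, by push_cast; omega⟩
      · intro a' b' hab hbj hP
        rcases Nat.lt_succ_iff_lt_or_eq.mp (Nat.lt_succ_of_le hbj) with h | h
        · exact le_trans (hBdom a' b' hab (by omega) hP) (le_max_left _ _)
        · subst h
          have hm := hmin a' (by omega) hP
          have hle2 : ((j + 1 : Nat) : Int) - (a' : Int) ≤ (j : Int) - t := by push_cast; omega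
          exact le_trans hle2 (le_max_right _ _)

theorem pvB_isMax (arr arr1 : List Int) : pvIsMax arr arr1 (commonsumof_arrays_alt arr arr1) := by
  rw [pvB_natform]
  obtain ⟨B, D, hfold, _, hB0, hBex, hBdom⟩ := pvB_inv arr arr1 arr.length
  rw [hfold]
  refine ⟨hB0, ?_, ?_⟩
  · rcases hBex with h | ⟨a, b, h1, h2, h3, h4⟩
    · exact Or.inl h
    · exact Or.inr ⟨a, b, ⟨h1, h2, h3⟩, h4⟩
  · rintro a b ⟨h1, h2, h3⟩
    exact hBdom a b h1 h2 h3

-- ===== VERDICT (by name: the statement is the Claim_ definition above) =====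
theorem commonsumof_arrays_spec : Claim_equal_commonsumof_arrays := by
  intro arr arr1 _ _
  exact pvIsMax_unique arr arr1 _ _ (pvA_isMax arr arr1) (pvB_isMax arr arr1)
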